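-- pv_equiv track=rewrite | github.com/trung3am/btl1 | watersort.py | allSorted
-- ===== SOURCE A (Python) =====
-- def sorted(bottle)->bool:
--   if len(bottle)==0:
--     return True
--   for i in bottle:
--     if i != bottle[0]: return False
--   return True
--
-- def allSorted(bottles)->bool:
--   if len(bottles) == 0: return True
--   for i in bottles:
--     res = sorted(i)
--     if res == False: return False
--   for i in range(len(bottles)):
--     if len(bottles[i])==0: continue
--     for j in range(i+1,len(bottles)):
--       if len(bottles[j])==0: continue
--       if bottles[i][0] == bottles[j][0]: return False
--   return res
-- ===== SOURCE B (Python) =====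
-- def allSorted(bottles) -> bool:
--     firsts = []
--     for b in bottles:
--         for x in b:
--             if x != b[0]:
--                 return False
--         if b:
--             firsts.append(b[0])
--     firsts.sort()
--     for k in range(1, len(firsts)):
--         if firsts[k - 1] == firsts[k]:
--             return False
--     return True
-- ===== Notes on version B (the rewrite author's own statement) =====
-- stated objective: alternative
-- what changed: Single pass collects each non-empty bottle's first color while checking monochromaticity, then a sort plus adjacent-pair scan replaces A's nested pairwise duplicate scan.
import Mathlib
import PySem

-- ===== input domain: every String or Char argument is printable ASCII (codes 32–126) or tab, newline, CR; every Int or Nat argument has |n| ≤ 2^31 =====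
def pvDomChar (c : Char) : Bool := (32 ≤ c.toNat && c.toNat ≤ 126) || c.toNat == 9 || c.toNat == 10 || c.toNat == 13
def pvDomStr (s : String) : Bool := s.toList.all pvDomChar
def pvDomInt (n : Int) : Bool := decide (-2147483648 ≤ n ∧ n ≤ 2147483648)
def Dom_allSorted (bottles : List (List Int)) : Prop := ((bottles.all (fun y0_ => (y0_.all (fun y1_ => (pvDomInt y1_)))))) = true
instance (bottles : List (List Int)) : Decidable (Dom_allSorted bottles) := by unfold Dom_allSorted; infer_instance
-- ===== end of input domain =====

-- B collects first colors in one pass and checks adjacent duplicates after a sort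
-- instead of A's nested pairwise first-color scan (objective: alternative).

-- ===== PORT A =====
-- helper `sorted(bottle)`: for-loop with early return False
def pySortedLoop : List Int → Int → Bool
  | [], _ => true
  | i :: rest, h => if i != h then false else pySortedLoop rest h

def pySorted (bottle : List Int) : Bool :=
  if bottle.length = 0 then true
  else pySortedLoop bottle (bottle.headD 0)

-- first loop of allSorted: res = sorted(i); if res == False: return False
def monoLoop : List (List Int) → Bool
  | [] => true
  | b :: rest => if pySorted b == false then false else monoLoop rest

-- inner j-loop: scan the bottles after i for an equal first color
def scanJ (h : Int) : List (List Int) → Bool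
  | [] => false
  | c :: rest =>
    if c.length = 0 then scanJ h rest
    else if c.headD 0 == h then true
    else scanJ h rest

-- outer i-loop of the nested duplicate scan
def scanI : List (List Int) → Bool
  | [] => false
  | b :: rest =>
    if b.length = 0 then scanI rest
    else if scanJ (b.headD 0) rest then true
    else scanI rest

def allSorted (bottles : List (List Int)) : Bool :=
  if bottles.length = 0 then true
  else if monoLoop bottles == false then false
  else if scanI bottles then false
  else true  -- `return res`; res is True here since the first loop completed

-- ===== PORT B =====
-- B's inner loop: for x in b: if x != b[0]: return False
def altMono (b : List Int) : Bool := b.all (fun x => x == b.headD 0)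

-- B's adjacent-duplicate scan over the sorted firsts
def adjDup : List Int → Bool
  | x :: y :: t => if x == y then true else adjDup (y :: t)
  | _ => false

-- B's single pass: check monochrome, accumulate first colors of non-empty bottles
def altGo : List (List Int) → List Int → Bool
  | [], firsts => !adjDup (PySem.List.sorted firsts (fun x => x) false)
  | b :: rest, firsts =>
    if !altMono b then false
    else altGo rest (if b.length ≠ 0 then firsts ++ [b.headD 0] else firsts)

def allSorted_alt (bottles : List (List Int)) : Bool := altGo bottles []

-- ===== PRECONDITION & SPEC =====
def Spec_allSorted (bottles : List (List Int)) (out : Bool) : Prop := out = allSorted_alt bottles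
instance (bottles : List (List Int)) (out : Bool) : Decidable (Spec_allSorted bottles out) := by unfold Spec_allSorted; infer_instance

-- ===== CLAIM (what is proved, stated in full; the proofs are below) =====
def Claim_equal_allSorted : Prop := ∀ (bottles : List (List Int)), Dom_allSorted bottles → Spec_allSorted bottles (allSorted bottles)

-- ===== LEMMAS AND PROOFS =====

-- the first colors of the non-empty bottles
def firstsOf (bottles : List (List Int)) : List Int := bottles.filterMap List.head?

theorem pySortedLoop_eq_all (l : List Int) (x : Int) :
    pySortedLoop l x = l.all (fun i => i == x) := by
  induction l with
  | nil => rfl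
  | cons a l ih =>
    simp only [pySortedLoop, List.all_cons, ih]
    by_cases hax : a = x <;> simp [hax]

theorem pySorted_eq_altMono (b : List Int) : pySorted b = altMono b := by
  cases b with
  | nil => rfl
  | cons h t =>
    simp [pySorted, altMono, pySortedLoop_eq_all]

theorem scanJ_eq_mem (h : Int) (bs : List (List Int)) :
    scanJ h bs = decide (h ∈ firstsOf bs) := by
  induction bs with
  | nil => simp [scanJ, firstsOf]
  | cons c rest ih =>
    cases c with
    | nil => simpa [scanJ, firstsOf] using ih
    | cons x t =>
      simp only [scanJ, firstsOf, List.length_cons, List.headD_cons, List.filterMap_cons,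
        List.head?_cons]
      by_cases hx : x = h
      · simp [hx]
      · simp [hx, Ne.symm hx, firstsOf] at ih ⊢; simpa [eq_comm] using ih

theorem scanI_eq_dup (bs : List (List Int)) :
    scanI bs = !decide (firstsOf bs).Nodup := by
  induction bs with
  | nil => simp [scanI, firstsOf]
  | cons b rest ih =>
    cases b with
    | nil => simpa [scanI, firstsOf] using ih
    | cons x t =>
      simp only [scanI, List.length_cons, List.headD_cons, scanJ_eq_mem, firstsOf,
        List.filterMap_cons, List.head?_cons] at ih ⊢
      by_cases hm : x ∈ rest.filterMap List.head?
      · simp [hm, List.nodup_cons]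
      · simp [hm, List.nodup_cons, ih]

theorem adjDup_eq_false_iff_chain' (l : List Int) :
    adjDup l = false ↔ l.IsChain (fun a b => a ≠ b) := by
  induction l with
  | nil => simp [adjDup]
  | cons x l ih =>
    cases l with
    | nil => simp [adjDup]
    | cons y t =>
      by_cases hxy : x = y
      · simp [adjDup, hxy]
      · rw [show adjDup (x :: y :: t) = adjDup (y :: t) by simp [adjDup, hxy],
          ih, List.isChain_cons_cons]
        simp [hxy]

theorem chain'_lt_of_pairwise_le_chain'_ne (l : List Int)
    (hle : l.Pairwise (· ≤ ·)) (hne : l.IsChain (fun a b => a ≠ b)) :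
    l.IsChain (· < ·) := by
  induction l with
  | nil => exact List.IsChain.nil
  | cons x l ih =>
    cases l with
    | nil => exact List.isChain_singleton x
    | cons y t =>
      rw [List.isChain_cons_cons] at hne ⊢
      rw [List.pairwise_cons] at hle
      refine ⟨lt_of_le_of_ne (hle.1 y (by simp)) hne.1, ih hle.2 hne.2⟩

theorem adjDup_sorted_eq (l : List Int) :
    adjDup (PySem.List.sorted l (fun x => x) false) = !decide l.Nodup := by
  set s := PySem.List.sorted l (fun x => x) false with hs
  have hperm : s.Perm l := PySem.List.sorted_perm l (fun x => x) false
  have hpw : s.Pairwise (fun a b => a ≤ b) := PySem.List.sorted_pairwise l (fun x => x)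
  by_cases hn : l.Nodup
  · have hsn : s.Nodup := hperm.nodup_iff.mpr hn
    have : s.IsChain (fun a b => a ≠ b) := List.Pairwise.isChain hsn
    simp [hn, (adjDup_eq_false_iff_chain' s).mpr this]
  · simp only [hn, decide_false, Bool.not_false]
    by_contra hcon
    have hfalse : adjDup s = false := by
      cases hq : adjDup s
      · rfl
      · exact absurd hq (by simpa [hq] using hcon)
    have hch := (adjDup_eq_false_iff_chain' s).mp hfalse
    have hlt := chain'_lt_of_pairwise_le_chain'_ne s hpw hch
    have : s.Pairwise (· < ·) := List.isChain_iff_pairwise.mp hlt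
    exact hn (hperm.nodup_iff.mp (this.imp ne_of_lt))

theorem altGo_eq (bs : List (List Int)) (acc : List Int) :
    altGo bs acc =
      if monoLoop bs then !adjDup (PySem.List.sorted (acc ++ firstsOf bs) (fun x => x) false)
      else false := by
  induction bs generalizing acc with
  | nil => simp [altGo, monoLoop, firstsOf]
  | cons b rest ih =>
    simp only [altGo, monoLoop, pySorted_eq_altMono]
    cases hm : altMono b
    · simp
    · simp only [Bool.not_true, Bool.false_eq_true, if_false]
      rw [ih]
      cases b with
      | nil => simp [firstsOf]
      | cons x t => simp [firstsOf, List.append_assoc]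

theorem allSorted_spec_aux (bottles : List (List Int)) :
    allSorted bottles = allSorted_alt bottles := by
  unfold allSorted allSorted_alt
  rw [altGo_eq]
  by_cases h0 : bottles.length = 0
  · have : bottles = [] := List.length_eq_zero_iff.mp h0
    subst this
    simp [monoLoop, firstsOf, adjDup, PySem.List.sorted]
  · simp only [if_neg h0]
    cases hm : monoLoop bottles
    · simp
    · simp only [if_true, List.nil_append]
      rw [scanI_eq_dup, adjDup_sorted_eq]
      cases hn : decide (firstsOf bottles).Nodup <;> simp

-- ===== VERDICT (by name: the statement is the Claim_ definition above) =====
theorem allSorted_spec : Claim_equal_allSorted := by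
  intro bottles _
  unfold Spec_allSorted
  exact allSorted_spec_aux bottles
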